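-- pv_equiv track=rewrite | github.com/AbirAhammedBhuiyan/bracu | CSE221/as-1/lab-01/problem1.py | palindromeCount
-- ===== SOURCE A (Python) =====
-- def isPalindrome(word):
--
--     if len(word) == 0:
--         return "is not a palindrome"
--     else:
--         for i in range(int(len(word)/2)):
--             if word[i] != word[len(word)-1-i]:
--                 return "is not a palindrome"
--     return "is a palindrome"
--
-- def palindromeCount(data_input):
--
--     palindrome_counts = {'palindrome': 0, 'nonpalindrome': 0}
--
--     for data in data_input:
--         word = data.split()[1]
--         if isPalindrome(word) == "is not a palindrome":
--             palindrome_counts['nonpalindrome'] += 1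
--         else:
--             palindrome_counts['palindrome'] += 1
--
--     return palindrome_counts
-- ===== SOURCE B (Python) =====
-- def palindromeCount(data_input):
--     words = [line.split()[1] for line in data_input]
--     p = sum(1 for w in words if w == w[::-1])
--     return {'palindrome': p, 'nonpalindrome': len(words) - p}
-- ===== Notes on version B (the rewrite author's own statement) =====
-- stated objective: simpler
-- what changed: B extracts all words first, counts palindromes by comparing each word with its slice-reversal in one sum, and derives the non-palindrome count by subtraction, replacing A's helper with its two-pointer half-scan loop and the per-line two-way dict-increment branch.
import Mathlib
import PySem

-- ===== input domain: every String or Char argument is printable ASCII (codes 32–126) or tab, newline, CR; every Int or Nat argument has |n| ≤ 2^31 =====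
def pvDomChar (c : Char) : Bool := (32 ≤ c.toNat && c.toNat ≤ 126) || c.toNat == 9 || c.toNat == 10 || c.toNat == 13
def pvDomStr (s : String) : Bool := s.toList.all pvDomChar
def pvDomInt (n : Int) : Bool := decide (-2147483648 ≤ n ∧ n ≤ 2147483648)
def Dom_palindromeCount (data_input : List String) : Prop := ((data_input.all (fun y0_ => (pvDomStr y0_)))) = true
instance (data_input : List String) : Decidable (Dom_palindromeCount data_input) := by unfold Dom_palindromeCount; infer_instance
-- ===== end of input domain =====

-- B is simpler: it extracts the words first, counts palindromes once by comparison with the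
-- reversal, and derives the non-palindrome count by subtraction.
-- ===== PORT A =====
-- helper isPalindrome: the early-return half-scan loop becomes List.any over the same range;
-- int(len(word)/2) on a nonnegative length is floor division; word[i] / word[len(word)-1-i]
-- are always in range inside the loop, so pyGetD with a dummy default is exact there.
def isPalindrome (word : String) : String :=
  let cs := word.toList
  let n : Int := cs.length
  if n = 0 then "is not a palindrome"
  else if (PySem.List.pyRange 0 (PySem.Int.floordiv n 2) 1).any
        (fun i => PySem.List.pyGetD cs i ' ' ≠ PySem.List.pyGetD cs (n - 1 - i) ' ')
  then "is not a palindrome"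
  else "is a palindrome"

-- data.split()[1] is in range under Pre_, so pyGetD with a dummy default is exact.
def palindromeCount (data_input : List String) : List (String × Int) :=
  let init : PySem.Dict String Int :=
    PySem.Dict.ofList [("palindrome", 0), ("nonpalindrome", 0)]
  (data_input.foldl (fun d data =>
      let word := PySem.List.pyGetD (PySem.Str.split₀ data) 1 ""
      if isPalindrome word = "is not a palindrome" then
        d.modify "nonpalindrome" 0 (· + 1)
      else
        d.modify "palindrome" 0 (· + 1)) init).items

-- ===== PORT B =====
-- w == w[::-1] is comparison with the reversal (PySem.Str.slice?_none_none_neg_one);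
-- sum(1 for w in words if …) is countP; the returned dict literal is its association list.
def palindromeCount_alt (data_input : List String) : List (String × Int) :=
  let words := data_input.map (fun line => PySem.List.pyGetD (PySem.Str.split₀ line) 1 "")
  let p : Int := words.countP (fun w => w.toList = w.toList.reverse)
  [("palindrome", p), ("nonpalindrome", (words.length : Int) - p)]

-- ===== PRECONDITION & SPEC =====
-- Pre_ excludes exactly the lines with fewer than two whitespace-separated tokens, on which
-- both Pythons raise IndexError at line.split()[1].
def Pre_palindromeCount (data_input : List String) : Prop :=
  ∀ line ∈ data_input, 2 ≤ (PySem.Str.split₀ line).length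
instance (data_input : List String) : Decidable (Pre_palindromeCount data_input) := by
  unfold Pre_palindromeCount; infer_instance

def pvWitness_palindromeCount : List String := ["0 aba", "1 xy"]

def Spec_palindromeCount (data_input : List String) (out : List (String × Int)) : Prop :=
  out = palindromeCount_alt data_input
instance (data_input : List String) (out : List (String × Int)) : Decidable (Spec_palindromeCount data_input out) := by
  unfold Spec_palindromeCount; infer_instance

-- ===== CLAIM (what is proved, stated in full; the proofs are below) =====
def Claim_equal_palindromeCount : Prop := ∀ (data_input : List String), Dom_palindromeCount data_input → Pre_palindromeCount data_input → Spec_palindromeCount data_input (palindromeCount data_input)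

-- ===== LEMMAS AND PROOFS =====

-- every token produced by split() is a nonempty string
lemma split₀_go_ne_nil (s : List Char) (cur : List Char) (acc : List (List Char))
    (hacc : ∀ w ∈ acc, w ≠ []) :
    ∀ w ∈ PySem.Chars.split₀.go s cur acc, w ≠ [] := by
  induction s generalizing cur acc with
  | nil =>
    intro w hw
    unfold PySem.Chars.split₀.go at hw
    split at hw
    · exact hacc w (List.mem_reverse.mp hw)
    · rename_i hne
      rcases List.mem_cons.mp (List.mem_reverse.mp hw) with h | h
      · subst h
        simp only [List.isEmpty_iff] at hne
        simpa using hne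
      · exact hacc w h
  | cons c rest ih =>
    intro w hw
    unfold PySem.Chars.split₀.go at hw
    split at hw
    · split at hw
      · exact ih [] acc hacc w hw
      · rename_i hne
        refine ih [] _ ?_ w hw
        intro v hv
        rcases List.mem_cons.mp hv with h | h
        · subst h
          simp only [List.isEmpty_iff] at hne
          simpa using hne
        · exact hacc v h
    · exact ih (c :: cur) acc hacc w hw

lemma split₀_ne_nil (line : String) :
    ∀ w ∈ PySem.Str.split₀ line, w.toList ≠ [] := by
  intro w hw
  simp only [PySem.Str.split₀, List.mem_map] at hw
  obtain ⟨cs, hcs, rfl⟩ := hw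
  have h := split₀_go_ne_nil line.toList [] [] (by simp) cs hcs
  simpa using h

lemma floordiv_two (m : Nat) : PySem.Int.floordiv (m : Int) 2 = ((m / 2 : Nat) : Int) := by
  rw [show PySem.Int.floordiv (m : Int) 2 = Int.fdiv (m : Int) 2 from rfl, Int.fdiv_eq_ediv]
  omega

lemma pal_of_half (cs : List Char)
    (hall : ∀ i : Int, 0 ≤ i → i < ((cs.length / 2 : Nat) : Int) →
      PySem.List.pyGetD cs i ' ' = PySem.List.pyGetD cs ((cs.length : Int) - 1 - i) ' ') :
    cs = cs.reverse := by
  have key : ∀ k : Nat, (hk : k < cs.length) → cs[k] = cs[cs.length - 1 - k]'(by omega) := by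
    intro k hk
    have conv1 : ∀ j : Nat, (hj : j < cs.length) →
        PySem.List.pyGetD cs (j : Int) ' ' = cs[j] := by
      intro j hj
      rw [PySem.List.pyGetD_eq_getElem cs ' ' (by omega) (by exact_mod_cast hj)]
      simp
    by_cases hhalf : k < cs.length / 2
    · have h := hall k (by omega) (by exact_mod_cast hhalf)
      rw [conv1 k hk] at h
      have : ((cs.length : Int) - 1 - k) = ((cs.length - 1 - k : Nat) : Int) := by omega
      rw [this, conv1 _ (by omega)] at h
      exact h
    · by_cases hmid : cs.length - 1 - k = k
      · simp [hmid]
      · -- k ≥ n/2 and not middle: apply hall at j = n-1-k < n/2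
        have hj : cs.length - 1 - k < cs.length / 2 := by omega
        have h := hall ((cs.length - 1 - k : Nat) : Int) (by omega) (by exact_mod_cast hj)
        rw [conv1 _ (by omega)] at h
        have : ((cs.length : Int) - 1 - ((cs.length - 1 - k : Nat) : Int)) = (k : Int) := by omega
        rw [this, conv1 k hk] at h
        exact h.symm
  apply List.ext_getElem (by simp)
  intro k hk _
  rw [List.getElem_reverse]
  exact key k hk

lemma isPalindrome_eq_iff (word : String) (h : word.toList ≠ []) :
    isPalindrome word = "is not a palindrome" ↔ ¬ (word.toList = word.toList.reverse) := by
  have hn : ((word.toList.length : Int) = 0) = False := by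
    refine eq_false ?_
    intro h0
    exact h (List.length_eq_zero_iff.mp (by exact_mod_cast h0))
  simp only [isPalindrome, hn, if_false, floordiv_two]
  have key : ((PySem.List.pyRange 0 ((word.toList.length / 2 : Nat) : Int) 1).any
      (fun i => PySem.List.pyGetD word.toList i ' ' ≠
        PySem.List.pyGetD word.toList ((word.toList.length : Int) - 1 - i) ' ')) = true
      ↔ ¬ (word.toList = word.toList.reverse) := by
    rw [List.any_eq_true]
    constructor
    · rintro ⟨i, hi, hne⟩ hpal
      rw [PySem.List.mem_pyRange_one] at hi
      simp only [decide_eq_true_eq] at hne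
      apply hne
      have h2 : word.toList.length / 2 ≤ word.toList.length := by omega
      have e1 : PySem.List.pyGetD word.toList i ' ' = word.toList[i.toNat]'(by omega) := by
        rw [PySem.List.pyGetD_eq_getElem _ ' ' (by omega) (by omega)]
      have e2 : PySem.List.pyGetD word.toList ((word.toList.length : Int) - 1 - i) ' '
          = word.toList[word.toList.length - 1 - i.toNat]'(by omega) := by
        rw [PySem.List.pyGetD_eq_getElem _ ' ' (by omega) (by omega)]
        congr 1
        omega
      rw [e1, e2]
      have hopt : word.toList[i.toNat]? = word.toList[word.toList.length - 1 - i.toNat]? := by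
        conv_lhs => rw [hpal]
        rw [List.getElem?_reverse (by omega)]
      rw [List.getElem?_eq_getElem (by omega), List.getElem?_eq_getElem (by omega)] at hopt
      exact Option.some.inj hopt
    · intro hne
      by_contra hall
      apply hne
      simp only [not_exists, not_and] at hall
      apply pal_of_half
      intro i h0 hlt
      have := hall i (by rw [PySem.List.mem_pyRange_one]; omega)
      simpa using this
  have triv : ∀ b : Bool,
      ((if b then ("is not a palindrome" : String) else "is a palindrome") = "is not a palindrome")
        ↔ b = true := by
    intro b
    cases b <;> simp
  rw [triv]
  exact key

-- the dict-increment loop, with the two counters generalized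
lemma foldl_items (lines : List String) (a b : Int) :
    (lines.foldl (fun d data =>
        let word := PySem.List.pyGetD (PySem.Str.split₀ data) 1 ""
        if isPalindrome word = "is not a palindrome" then
          d.modify "nonpalindrome" 0 (· + 1)
        else
          d.modify "palindrome" 0 (· + 1))
      (PySem.Dict.mk [("palindrome", a), ("nonpalindrome", b)])).items
    = [("palindrome",
          a + (lines.countP (fun line =>
                ¬ isPalindrome (PySem.List.pyGetD (PySem.Str.split₀ line) 1 "") = "is not a palindrome") : Int)),
       ("nonpalindrome",
          b + (lines.countP (fun line =>
                isPalindrome (PySem.List.pyGetD (PySem.Str.split₀ line) 1 "") = "is not a palindrome") : Int))] := by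
  induction lines generalizing a b with
  | nil => simp
  | cons l ls ih =>
    rw [List.foldl_cons]
    by_cases hl : isPalindrome (PySem.List.pyGetD (PySem.Str.split₀ l) 1 "") = "is not a palindrome"
    · simp only [if_pos hl]
      rw [show (PySem.Dict.mk [("palindrome", a), ("nonpalindrome", b)]).modify "nonpalindrome" 0 (· + 1)
          = PySem.Dict.mk [("palindrome", a), ("nonpalindrome", b + 1)] from rfl]
      rw [ih]
      rw [List.countP_cons_of_neg (by simpa using hl), List.countP_cons_of_pos (by simpa using hl)]
      simp only [List.cons.injEq, Prod.mk.injEq, true_and, and_true]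
      omega
    · simp only [if_neg hl]
      rw [show (PySem.Dict.mk [("palindrome", a), ("nonpalindrome", b)]).modify "palindrome" 0 (· + 1)
          = PySem.Dict.mk [("palindrome", a + 1), ("nonpalindrome", b)] from rfl]
      rw [ih]
      rw [List.countP_cons_of_pos (by simpa using hl), List.countP_cons_of_neg (by simpa using hl)]
      simp only [List.cons.injEq, Prod.mk.injEq, true_and, and_true]
      omega

lemma countP_add_countP_not {α : Type} (p : α → Prop) [DecidablePred p] (l : List α) :
    l.countP (fun a => p a) + l.countP (fun a => ¬ p a) = l.length := by
  induction l with
  | nil => rfl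
  | cons x xs ih =>
    by_cases hx : p x
    · rw [List.countP_cons_of_pos (by simpa using hx), List.countP_cons_of_neg (by simpa using hx)]
      simp only [List.length_cons]
      omega
    · rw [List.countP_cons_of_neg (by simpa using hx), List.countP_cons_of_pos (by simpa using hx)]
      simp only [List.length_cons]
      omega

set_option maxHeartbeats 1000000 in
-- ===== VERDICT (by name: the statement is the Claim_ definition above) =====
theorem palindromeCount_spec : Claim_equal_palindromeCount := by
  intro data_input _hdom hpre
  unfold Spec_palindromeCount palindromeCount palindromeCount_alt
  rw [show (PySem.Dict.ofList [("palindrome", (0:Int)), ("nonpalindrome", 0)] : PySem.Dict String Int)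
      = PySem.Dict.mk [("palindrome", 0), ("nonpalindrome", 0)] from rfl]
  rw [foldl_items]
  have hcongr : data_input.countP (fun line =>
        ¬ isPalindrome (PySem.List.pyGetD (PySem.Str.split₀ line) 1 "") = "is not a palindrome")
      = data_input.countP (fun line =>
        (PySem.List.pyGetD (PySem.Str.split₀ line) 1 "").toList
          = (PySem.List.pyGetD (PySem.Str.split₀ line) 1 "").toList.reverse) := by
    apply List.countP_congr
    intro line hline
    have h2 := hpre line hline
    have hmem : PySem.List.pyGetD (PySem.Str.split₀ line) 1 "" ∈ PySem.Str.split₀ line := by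
      apply PySem.List.pyGetD_mem
      simp [PySem.Raise.InRange]
      omega
    have hne := split₀_ne_nil line _ hmem
    have hiff := isPalindrome_eq_iff (PySem.List.pyGetD (PySem.Str.split₀ line) 1 "") hne
    simp only [decide_eq_true_eq]
    exact not_iff_comm.mpr hiff.symm
  have hsum := countP_add_countP_not
    (fun line => isPalindrome (PySem.List.pyGetD (PySem.Str.split₀ line) 1 "") = "is not a palindrome")
    data_input
  simp only [List.countP_map, Function.comp_def, List.length_map]
  rw [← hcongr]
  simp only [List.cons.injEq, Prod.mk.injEq, true_and, and_true]
  constructor <;> omega
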